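-- pv_equiv track=rewrite | github.com/LackOfSkillz/DireEngine | world/systems/timing_audit.py | _build_scheduler_breakdown
-- ===== SOURCE A (Python) =====
-- from collections import Counter
--
-- def _build_scheduler_breakdown(active_jobs):
--     by_system = Counter()
--     by_timing_mode = Counter()
--     by_key = Counter()
--     for job in list(active_jobs or []):
--         system = str((job or {}).get("system", "") or "").strip()
--         timing_mode = str((job or {}).get("timing_mode", "") or "").strip()
--         key = str((job or {}).get("key", "") or "").strip()
--         if system:
--             by_system[system] += 1
--         if timing_mode:
--             by_timing_mode[timing_mode] += 1
--         if key:
--             by_key[key] += 1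
--     return {
--         "by_system": dict(sorted(by_system.items())),
--         "by_timing_mode": dict(sorted(by_timing_mode.items())),
--         "by_key": dict(sorted(by_key.items())),
--     }
-- ===== SOURCE B (Python) =====
-- from collections import Counter
--
-- def _build_scheduler_breakdown(active_jobs):
--     jobs = list(active_jobs or [])
--
--     def count_field(field):
--         c = Counter()
--         for job in jobs:
--             value = str((job or {}).get(field, "") or "").strip()
--             if value:
--                 c[value] += 1
--         return dict(sorted(c.items()))
--
--     return {
--         "by_system": count_field("system"),
--         "by_timing_mode": count_field("timing_mode"),
--         "by_key": count_field("key"),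
--     }
-- ===== Notes on version B (the rewrite author's own statement) =====
-- stated objective: simpler
-- what changed: Replaces the single combined loop maintaining three parallel Counters with one small per-field helper (extract, count, sort) applied independently to 'system', 'timing_mode' and 'key'.
import Mathlib
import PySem

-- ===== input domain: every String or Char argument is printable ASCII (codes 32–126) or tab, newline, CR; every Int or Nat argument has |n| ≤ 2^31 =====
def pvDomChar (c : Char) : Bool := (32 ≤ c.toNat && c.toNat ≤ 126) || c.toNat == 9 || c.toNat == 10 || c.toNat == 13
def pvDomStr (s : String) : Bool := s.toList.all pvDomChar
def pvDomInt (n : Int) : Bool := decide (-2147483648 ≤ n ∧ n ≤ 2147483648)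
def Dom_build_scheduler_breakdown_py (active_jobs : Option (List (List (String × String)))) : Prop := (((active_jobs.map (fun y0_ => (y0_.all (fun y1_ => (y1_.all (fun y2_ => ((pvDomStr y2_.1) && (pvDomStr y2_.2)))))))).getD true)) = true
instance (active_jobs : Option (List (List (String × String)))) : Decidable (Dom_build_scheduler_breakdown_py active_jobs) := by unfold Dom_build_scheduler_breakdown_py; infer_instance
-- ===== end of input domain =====

-- B replaces A's single loop over three parallel Counters by one per-field helper
-- (extract, count, sort) applied to each of the three fields; return value only, no claim beyond equality.

-- ===== PORT A =====
-- str((job or {}).get(field, "") or "").strip() : get is first-match lookup with default "";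
-- 'or ""' and str() are identities on the string values admitted here.
def pvField (job : List (String × String)) (field : String) : String :=
  PySem.Str.strip ((PySem.Dict.mk job).getD field "")

def build_scheduler_breakdown_py (active_jobs : Option (List (List (String × String)))) : List (String × List (String × Int)) :=
  let st := (active_jobs.getD []).foldl
    (fun (st : PySem.Dict String Int × PySem.Dict String Int × PySem.Dict String Int) job =>
      let system := pvField job "system"
      let timing_mode := pvField job "timing_mode"
      let key := pvField job "key"
      (if system ≠ "" then st.1.modify system 0 (· + 1) else st.1,
       if timing_mode ≠ "" then st.2.1.modify timing_mode 0 (· + 1) else st.2.1,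
       if key ≠ "" then st.2.2.modify key 0 (· + 1) else st.2.2))
    (PySem.Dict.empty, PySem.Dict.empty, PySem.Dict.empty)
  [("by_system", PySem.List.sorted2 st.1.items (fun p => p.1) (fun p => p.2) false),
   ("by_timing_mode", PySem.List.sorted2 st.2.1.items (fun p => p.1) (fun p => p.2) false),
   ("by_key", PySem.List.sorted2 st.2.2.items (fun p => p.1) (fun p => p.2) false)]

-- ===== PORT B =====
def pvCountField (jobs : List (List (String × String))) (field : String) : List (String × Int) :=
  let c := jobs.foldl
    (fun (c : PySem.Dict String Int) job =>
      let value := PySem.Str.strip ((PySem.Dict.mk job).getD field "")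
      if value ≠ "" then c.modify value 0 (· + 1) else c)
    PySem.Dict.empty
  PySem.List.sorted2 c.items (fun p => p.1) (fun p => p.2) false

def build_scheduler_breakdown_py_alt (active_jobs : Option (List (List (String × String)))) : List (String × List (String × Int)) :=
  let jobs := active_jobs.getD []
  [("by_system", pvCountField jobs "system"),
   ("by_timing_mode", pvCountField jobs "timing_mode"),
   ("by_key", pvCountField jobs "key")]

-- ===== PRECONDITION & SPEC =====
def Spec_build_scheduler_breakdown_py (active_jobs : Option (List (List (String × String)))) (out : List (String × List (String × Int))) : Prop := out = build_scheduler_breakdown_py_alt active_jobs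
instance (active_jobs : Option (List (List (String × String)))) (out : List (String × List (String × Int))) : Decidable (Spec_build_scheduler_breakdown_py active_jobs out) := by unfold Spec_build_scheduler_breakdown_py; infer_instance

-- ===== CLAIM (what is proved, stated in full; the proofs are below) =====
def Claim_equal_build_scheduler_breakdown_py : Prop := ∀ (active_jobs : Option (List (List (String × String)))), Dom_build_scheduler_breakdown_py active_jobs → Spec_build_scheduler_breakdown_py active_jobs (build_scheduler_breakdown_py active_jobs)

-- ===== LEMMAS AND PROOFS =====

-- A's combined fold over the triple of counters is the triple of B's three per-field folds.
theorem pv_fold3_eq (l : List (List (String × String))) :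
    ∀ (a b c : PySem.Dict String Int),
    l.foldl
      (fun (st : PySem.Dict String Int × PySem.Dict String Int × PySem.Dict String Int) job =>
        let system := pvField job "system"
        let timing_mode := pvField job "timing_mode"
        let key := pvField job "key"
        (if system ≠ "" then st.1.modify system 0 (· + 1) else st.1,
         if timing_mode ≠ "" then st.2.1.modify timing_mode 0 (· + 1) else st.2.1,
         if key ≠ "" then st.2.2.modify key 0 (· + 1) else st.2.2)) (a, b, c) =
    (l.foldl (fun (c : PySem.Dict String Int) job =>
        let value := PySem.Str.strip ((PySem.Dict.mk job).getD "system" "")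
        if value ≠ "" then c.modify value 0 (· + 1) else c) a,
     l.foldl (fun (c : PySem.Dict String Int) job =>
        let value := PySem.Str.strip ((PySem.Dict.mk job).getD "timing_mode" "")
        if value ≠ "" then c.modify value 0 (· + 1) else c) b,
     l.foldl (fun (c : PySem.Dict String Int) job =>
        let value := PySem.Str.strip ((PySem.Dict.mk job).getD "key" "")
        if value ≠ "" then c.modify value 0 (· + 1) else c) c) := by
  induction l with
  | nil => intro a b c; rfl
  | cons x xs ih => intro a b c; exact ih _ _ _

-- ===== VERDICT (by name: the statement is the Claim_ definition above) =====
theorem build_scheduler_breakdown_py_spec : Claim_equal_build_scheduler_breakdown_py := by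
  intro active_jobs _
  show build_scheduler_breakdown_py active_jobs = build_scheduler_breakdown_py_alt active_jobs
  unfold build_scheduler_breakdown_py build_scheduler_breakdown_py_alt pvCountField
  rw [pv_fold3_eq]
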